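-- pv_equiv track=rewrite | github.com/miliar/Code_Jam_Webscraper | Solutions_python/Problem_179/2831.py | flip
-- ===== SOURCE A (Python) =====
-- def flip(a):
--     a_ = ""
--     flip = True
--
--     flip_sign = "+" if a[0] == "+" else "-"
--
--     for c in a:
--         if c != flip_sign:
--             flip = False
--
--         if flip:
--             a_ += "+" if c == "-" else "-"
--         else:
--             a_ += c
--
--     return a_
-- ===== SOURCE B (Python) =====
-- def flip(a):
--     sign = "+" if a[0] == "+" else "-"
--     stripped = a.lstrip(sign)
--     opp = "-" if sign == "+" else "+"
--     return opp * (len(a) - len(stripped)) + stripped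
-- ===== Notes on version B (the rewrite author's own statement) =====
-- stated objective: simpler
-- what changed: Replaces the per-character loop with a flip flag (and quadratic string += accumulation) by lstrip of the leading sign run plus one string-repeat: the flipped prefix is just the opposite sign repeated.
import Mathlib
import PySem

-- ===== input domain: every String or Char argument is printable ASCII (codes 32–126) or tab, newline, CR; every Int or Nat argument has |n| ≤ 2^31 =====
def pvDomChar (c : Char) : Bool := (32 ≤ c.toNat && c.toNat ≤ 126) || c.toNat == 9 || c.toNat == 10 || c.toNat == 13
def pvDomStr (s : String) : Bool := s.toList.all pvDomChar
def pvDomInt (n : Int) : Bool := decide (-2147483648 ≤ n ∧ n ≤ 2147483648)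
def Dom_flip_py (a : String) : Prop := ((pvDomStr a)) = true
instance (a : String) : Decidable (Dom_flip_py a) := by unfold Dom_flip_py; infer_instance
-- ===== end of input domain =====

-- B replaces A's per-character loop with a flag by lstrip of the leading sign run plus one repeat (simpler, loop-free).

-- ===== PORT A =====
-- one step of A's loop: update the flip flag, then append the (possibly flipped) character
def flipStep (flipSign : Char) (s : List Char × Bool) (c : Char) : List Char × Bool :=
  let fl := if c ≠ flipSign then false else s.2
  (s.1 ++ [if fl then (if c = '-' then '+' else '-') else c], fl)

def flip_py (a : String) : String :=
  match PySem.Str.pyGet? a 0 with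
  | none => ""   -- a[0] raises IndexError on the empty string; excluded by Pre_flip_py
  | some c0 =>
    let flipSign : Char := if c0 = '+' then '+' else '-'
    let r := a.toList.foldl (flipStep flipSign) ([], true)
    String.ofList r.1

-- ===== PORT B =====
def flip_py_alt (a : String) : String :=
  match PySem.Str.pyGet? a 0 with
  | none => ""   -- a[0] raises IndexError on the empty string; excluded by Pre_flip_py
  | some c0 =>
    let sign : Char := if c0 = '+' then '+' else '-'
    -- a.lstrip(sign) with a one-character strip set: drop leading chars equal to sign (hand port, exact)
    let stripped := a.toList.dropWhile (· == sign)
    let opp : Char := if sign = '+' then '-' else '+'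
    String.ofList (List.replicate (a.toList.length - stripped.length) opp ++ stripped)

-- ===== PRECONDITION & SPEC =====
-- Pre_ excludes only the empty string, on which A (a[0]) raises IndexError.
def Pre_flip_py (a : String) : Prop := a.toList ≠ []
instance (a : String) : Decidable (Pre_flip_py a) := by unfold Pre_flip_py; infer_instance
def pvWitness_flip_py : String := "--+a-"

def Spec_flip_py (a : String) (out : String) : Prop := out = flip_py_alt a
instance (a : String) (out : String) : Decidable (Spec_flip_py a out) := by unfold Spec_flip_py; infer_instance

-- ===== CLAIM (what is proved, stated in full; the proofs are below) =====
def Claim_equal_flip_py : Prop := ∀ (a : String), Dom_flip_py a → Pre_flip_py a → Spec_flip_py a (flip_py a)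

-- ===== LEMMAS AND PROOFS =====

-- once the flag is False, A's loop just copies the rest of the string
lemma flipStep_foldl_false (sign : Char) (cs acc : List Char) :
    cs.foldl (flipStep sign) (acc, false) = (acc ++ cs, false) := by
  induction cs generalizing acc with
  | nil => simp
  | cons c cs ih =>
    simp only [List.foldl_cons, flipStep]
    by_cases h : c = sign <;> simp [h, ih]

-- A's loop = flipped leading sign run (replicate of the opposite sign) ++ untouched rest
lemma flipStep_foldl_true (sign : Char) (hs : sign = '+' ∨ sign = '-') (cs acc : List Char) :
    (cs.foldl (flipStep sign) (acc, true)).1 =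
      acc ++ List.replicate (cs.length - (cs.dropWhile (· == sign)).length)
               (if sign = '+' then '-' else '+') ++ cs.dropWhile (· == sign) := by
  induction cs generalizing acc with
  | nil => simp
  | cons c cs ih =>
    by_cases h : c = sign
    · subst h
      have hdrop : (c :: cs).dropWhile (· == c) = cs.dropWhile (· == c) := by
        simp [List.dropWhile]
      have hlen : (cs.dropWhile (· == c)).length ≤ cs.length :=
        List.length_dropWhile_le _ _
      have hstep : flipStep c (acc, true) c =
          (acc ++ [if c = '+' then '-' else '+'], true) := by
        rcases hs with h' | h' <;> simp [flipStep, h']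
      simp only [List.foldl_cons, hstep, hdrop]
      rw [ih]
      have : (c :: cs).length - (cs.dropWhile (· == c)).length =
          (cs.length - (cs.dropWhile (· == c)).length) + 1 := by
        simp only [List.length_cons]; omega
      rw [this, List.replicate_succ]
      simp
    · have hdrop : (c :: cs).dropWhile (· == sign) = c :: cs := by
        have : (c == sign) = false := by simp [h]
        simp [List.dropWhile, this]
      have hstep : flipStep sign (acc, true) c = (acc ++ [c], false) := by
        simp [flipStep, h]
      simp [List.foldl_cons, hstep, flipStep_foldl_false, hdrop]

-- ===== VERDICT (by name: the statement is the Claim_ definition above) =====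
theorem flip_py_spec : Claim_equal_flip_py := by
  intro a _ hpre
  unfold Spec_flip_py flip_py flip_py_alt
  cases hget : PySem.Str.pyGet? a 0 with
  | none =>
    exfalso
    apply hpre
    rw [show ((0:Int)) = ((0:Nat):Int) by rfl, PySem.Str.pyGet?_natCast] at hget
    cases h : a.toList with
    | nil => rfl
    | cons x xs => rw [h] at hget; simp at hget
  | some c0 =>
    simp only []
    have hs : (if c0 = '+' then '+' else '-') = '+' ∨
              (if c0 = '+' then '+' else '-') = '-' := by
      by_cases h : c0 = '+' <;> simp [h]
    rw [flipStep_foldl_true _ hs]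
    simp
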